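-- pv_equiv track=rewrite | github.com/sehagler/historical_record_ocr | py/hr_text_builder/text_table_to_entries.py | _join_text_table
-- ===== SOURCE A (Python) =====
-- def _join_text_table(text_table_segmented):
--     offset = 0
--     for i in range(len(text_table_segmented)):
--         for j in range(len(text_table_segmented[i])):
--             text_table_segmented[i][j][1] += offset
--         offset = text_table_segmented[i][-1][1] + 1
--     text_table_joined = []
--     for i in range(len(text_table_segmented)):
--         text_table_joined += text_table_segmented[i]
--     return text_table_joined
-- ===== SOURCE B (Python) =====
-- def _join_text_table(text_table_segmented):
--     # Divide-and-conquer: split the segment list in half, the right half's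
--     # offset is the summed span of the left half.  Returns fresh lists (does
--     # NOT mutate its argument, unlike A; the return value is identical).
--     return _shift_join(text_table_segmented, 0)
--
--
-- def _shift_join(segments, offset):
--     if len(segments) == 0:
--         return []
--     if len(segments) == 1:
--         return [elem[:1] + [elem[1] + offset] + elem[2:] for elem in segments[0]]
--     mid = len(segments) // 2
--     left, right = segments[:mid], segments[mid:]
--     span = sum(seg[-1][1] + 1 for seg in left)
--     return _shift_join(left, offset) + _shift_join(right, offset + span)
-- ===== Notes on version B (the rewrite author's own statement) =====
-- stated objective: alternative
-- what changed: A is an imperative two-pass loop (in-place mutation with a sequentially threaded offset, then a flatten loop); B is a divide-and-conquer recursion that splits the segment list in half, computes the right half's offset as the summed span of the left half, and builds fresh shifted element lists by slicing (no in-place mutation).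
import Mathlib
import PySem

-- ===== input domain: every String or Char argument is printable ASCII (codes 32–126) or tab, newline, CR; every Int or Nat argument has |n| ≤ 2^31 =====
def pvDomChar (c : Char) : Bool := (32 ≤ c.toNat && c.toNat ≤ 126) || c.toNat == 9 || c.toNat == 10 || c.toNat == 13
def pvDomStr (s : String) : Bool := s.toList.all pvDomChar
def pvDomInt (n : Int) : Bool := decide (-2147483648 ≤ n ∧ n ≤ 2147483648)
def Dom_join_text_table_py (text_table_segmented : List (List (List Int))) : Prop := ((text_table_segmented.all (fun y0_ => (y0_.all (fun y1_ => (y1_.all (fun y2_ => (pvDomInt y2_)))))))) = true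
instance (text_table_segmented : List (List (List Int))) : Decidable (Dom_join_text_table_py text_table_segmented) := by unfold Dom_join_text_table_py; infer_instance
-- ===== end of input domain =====

-- B replaces A's imperative two-pass loop by a divide-and-conquer recursion (right half's
-- offset = summed span of the left half) building fresh shifted lists; equal RETURN value
-- only: A mutates the inner lists in place, B does not mutate its argument.

-- ===== PORT A =====
-- Python's `elem[1] += offset` on the element list (in-range under Pre_)
def pvBump (off : Int) (e : List Int) : List Int :=
  e.set 1 ((PySem.List.pyGet? e 1).getD 0 + off)

-- pass 1: mutate every elem[1] by the running offset; offset re-read from the MUTATED segment;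
-- pass 2: text_table_joined += text_table_segmented[i]
def join_text_table_py (text_table_segmented : List (List (List Int))) : List (List Int) :=
  let st := text_table_segmented.foldl
    (fun (st : Int × List (List (List Int))) seg =>
      let seg' := seg.map (pvBump st.1)
      (((PySem.List.pyGet? ((PySem.List.pyGet? seg' (-1)).getD []) 1).getD 0) + 1,
       st.2 ++ [seg']))
    (0, [])
  st.2.foldl (fun acc seg => acc ++ seg) []

-- ===== PORT B =====
-- seg[-1][1], the span end of a segment
def pvLastIdx (seg : List (List Int)) : Int :=
  (PySem.List.pyGet? ((PySem.List.pyGet? seg (-1)).getD []) 1).getD 0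

-- elem[:1] + [elem[1] + offset] + elem[2:]  (slices with nonnegative bounds = take/drop)
def shiftElem (off : Int) (e : List Int) : List Int :=
  e.take 1 ++ [(PySem.List.pyGet? e 1).getD 0 + off] ++ e.drop 2

-- fuel = segments.length is only a structural totality guard (each recursive call halves
-- a list of length ≥ 2, so the fuel is never exhausted); the algorithm is Source B's
def shiftJoin (fuel : Nat) (segments : List (List (List Int))) (offset : Int) : List (List Int) :=
  match fuel with
  | 0 => []
  | fuel + 1 =>
    if segments.length = 0 then []
    else if segments.length = 1 then
      ((PySem.List.pyGet? segments 0).getD []).map (shiftElem offset)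
    else
      let mid := segments.length / 2
      let left := segments.take mid
      let right := segments.drop mid
      let span := (left.map (fun seg => pvLastIdx seg + 1)).sum
      shiftJoin fuel left offset ++ shiftJoin fuel right (offset + span)

def join_text_table_py_alt (text_table_segmented : List (List (List Int))) : List (List Int) :=
  shiftJoin text_table_segmented.length text_table_segmented 0

-- ===== PRECONDITION & SPEC =====
-- Pre_ excludes exactly the inputs on which Python A raises IndexError:
-- an empty segment (segment[-1]) or an element shorter than 2 (elem[1]).
def Pre_join_text_table_py (text_table_segmented : List (List (List Int))) : Prop :=
  (text_table_segmented.all (fun seg => !seg.isEmpty && seg.all (fun e => 2 ≤ e.length))) = true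
instance (text_table_segmented : List (List (List Int))) : Decidable (Pre_join_text_table_py text_table_segmented) := by unfold Pre_join_text_table_py; infer_instance

def pvWitness_join_text_table_py : List (List (List Int)) := [[[0, 0], [0, 1]], [[1, 0]]]

def Spec_join_text_table_py (text_table_segmented : List (List (List Int))) (out : List (List Int)) : Prop := out = join_text_table_py_alt text_table_segmented
instance (text_table_segmented : List (List (List Int))) (out : List (List Int)) : Decidable (Spec_join_text_table_py text_table_segmented out) := by unfold Spec_join_text_table_py; infer_instance

-- ===== CLAIM (what is proved, stated in full; the proofs are below) =====
def Claim_equal_join_text_table_py : Prop := ∀ (text_table_segmented : List (List (List Int))), Dom_join_text_table_py text_table_segmented → Pre_join_text_table_py text_table_segmented → Spec_join_text_table_py text_table_segmented (join_text_table_py text_table_segmented)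

-- ===== LEMMAS AND PROOFS =====

-- linear reference recursion, the common reduct of both ports
def linJoin : List (List (List Int)) → Int → List (List Int)
  | [], _ => []
  | seg :: rest, off => seg.map (shiftElem off) ++ linJoin rest (off + (pvLastIdx seg + 1))

lemma linJoin_append (l r : List (List (List Int))) (off : Int) :
    linJoin (l ++ r) off
      = linJoin l off ++ linJoin r (off + (l.map (fun seg => pvLastIdx seg + 1)).sum) := by
  induction l generalizing off with
  | nil => simp [linJoin]
  | cons a l ih =>
    simp only [List.cons_append, linJoin, List.map_cons, List.sum_cons, ih, List.append_assoc]
    ring_nf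

lemma shiftJoin_eq_lin (fuel : Nat) :
    ∀ (segs : List (List (List Int))) (off : Int), segs.length ≤ fuel →
    shiftJoin fuel segs off = linJoin segs off := by
  induction fuel with
  | zero =>
    intro segs off h
    rw [List.length_eq_zero_iff.mp (Nat.le_zero.mp h)]; rfl
  | succ n ih =>
    intro segs off h
    show (if segs.length = 0 then [] else _) = _
    by_cases h0 : segs.length = 0
    · rw [if_pos h0, List.length_eq_zero_iff.mp h0]; rfl
    · rw [if_neg h0]
      by_cases h1 : segs.length = 1
      · obtain ⟨seg, rfl⟩ := List.length_eq_one_iff.mp h1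
        simp [linJoin, PySem.List.pyGet?, PySem.List.pyIdx?]
      · rw [if_neg h1]
        show shiftJoin n _ off ++ shiftJoin n _ _ = _
        rw [ih _ off (by simp only [List.length_take]; omega),
            ih _ _ (by simp only [List.length_drop]; omega),
            ← linJoin_append, List.take_append_drop]

-- reading back the mutated index: (pvBump off e)[1] = e[1] + off when 2 ≤ e.length
lemma pyGet_pvBump (off : Int) (e : List Int) (h : 2 ≤ e.length) :
    PySem.List.pyGet? (pvBump off e) 1 = some ((PySem.List.pyGet? e 1).getD 0 + off) := by
  match e, h with
  | a :: b :: rest, _ => simp [pvBump, PySem.List.pyGet?, PySem.List.pyIdx?]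

-- B's fresh shifted element equals A's in-place bump when 2 ≤ e.length
lemma shiftElem_eq_pvBump (off : Int) (e : List Int) (h : 2 ≤ e.length) :
    shiftElem off e = pvBump off e := by
  match e, h with
  | a :: b :: rest, _ => simp [shiftElem, pvBump, PySem.List.pyGet?, PySem.List.pyIdx?]

-- A's post-mutation offset read equals the pre-mutation read plus the old offset
lemma offset_agree (off : Int) (seg : List (List Int))
    (hne : seg ≠ []) (hlen : ∀ e ∈ seg, 2 ≤ e.length) :
    ((PySem.List.pyGet? ((PySem.List.pyGet? (seg.map (pvBump off)) (-1)).getD []) 1).getD 0) + 1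
      = off + (pvLastIdx seg + 1) := by
  unfold pvLastIdx
  rw [PySem.List.pyGet?_neg_one, PySem.List.pyGet?_neg_one, List.getLast?_map]
  obtain ⟨l, hl⟩ := List.getLast?_isSome.mpr hne |> Option.isSome_iff_exists.mp
  rw [hl]
  simp only [Option.map_some, Option.getD_some]
  rw [pyGet_pvBump off l (hlen l (List.mem_of_getLast? hl))]
  simp only [Option.getD_some]; ring

-- flatten-fold over an accumulator extended by one segment
lemma flat_snoc (acc : List (List (List Int))) (seg : List (List Int)) :
    (acc ++ [seg]).foldl (fun a s => a ++ s) [] = acc.foldl (fun a s => a ++ s) [] ++ seg := by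
  rw [List.foldl_append]; rfl

-- main invariant: flatten of A's fold = flatten of accumulator ++ linJoin of the rest
lemma main_inv (tts : List (List (List Int))) :
    ∀ (off : Int) (accA : List (List (List Int))),
    (∀ seg ∈ tts, seg ≠ [] ∧ ∀ e ∈ seg, 2 ≤ e.length) →
    ((tts.foldl
      (fun (st : Int × List (List (List Int))) seg =>
        let seg' := seg.map (pvBump st.1)
        (((PySem.List.pyGet? ((PySem.List.pyGet? seg' (-1)).getD []) 1).getD 0) + 1,
         st.2 ++ [seg'])) (off, accA)).2).foldl (fun a s => a ++ s) []
    = accA.foldl (fun a s => a ++ s) [] ++ linJoin tts off := by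
  induction tts with
  | nil => intro off accA _; simp [linJoin]
  | cons seg rest ih =>
    intro off accA hpre
    obtain ⟨hne, hlen⟩ := hpre seg (List.mem_cons_self)
    simp only [List.foldl_cons]
    rw [offset_agree off seg hne hlen,
        ih _ _ (fun s hs => hpre s (List.mem_cons_of_mem _ hs)),
        flat_snoc, linJoin, List.append_assoc]
    congr 2
    exact (List.map_congr_left fun e he => (shiftElem_eq_pvBump off e (hlen e he)).symm)

-- ===== VERDICT (by name: the statement is the Claim_ definition above) =====
theorem join_text_table_py_spec : Claim_equal_join_text_table_py := by
  intro tts _ hpre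
  unfold Spec_join_text_table_py join_text_table_py join_text_table_py_alt
  rw [shiftJoin_eq_lin tts.length tts 0 le_rfl]
  refine main_inv tts 0 [] ?_
  intro seg hseg
  have h := List.all_eq_true.mp hpre seg hseg
  simp only [Bool.and_eq_true, Bool.not_eq_true', List.isEmpty_eq_false_iff,
    List.all_eq_true, decide_eq_true_eq] at h
  exact h
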